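-- pv_equiv track=rewrite | github.com/AmolNarang/absa_and_opinion_mining_api | loco_nlp/preprocessing/dict_processor.py | dict_max
-- ===== SOURCE A (Python) =====
-- def dict_max(dic_list):
--     result = {}
--     for dic in dic_list:
--         for word, count in dic.items():
--             if word not in result:
--                 result[word] = []
--             result[word].append(count)
--
--     for word, count_list in dict(result).items():
--         result[word] = max(count_list)
--
--     return result
-- ===== SOURCE B (Python) =====
-- def dict_max(dic_list):
--     # single pass: keep only the running maximum per word
--     result = {}
--     for dic in dic_list:
--         for word, count in dic.items():
--             if word not in result:
--                 result[word] = count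
--             else:
--                 result[word] = max(result[word], count)
--     return result
-- ===== Notes on version B (the rewrite author's own statement) =====
-- stated objective: simpler
-- what changed: B keeps a single running maximum per word in one pass, eliminating A's intermediate per-word count lists and its whole second reduction pass over the dict.
import Mathlib
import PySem

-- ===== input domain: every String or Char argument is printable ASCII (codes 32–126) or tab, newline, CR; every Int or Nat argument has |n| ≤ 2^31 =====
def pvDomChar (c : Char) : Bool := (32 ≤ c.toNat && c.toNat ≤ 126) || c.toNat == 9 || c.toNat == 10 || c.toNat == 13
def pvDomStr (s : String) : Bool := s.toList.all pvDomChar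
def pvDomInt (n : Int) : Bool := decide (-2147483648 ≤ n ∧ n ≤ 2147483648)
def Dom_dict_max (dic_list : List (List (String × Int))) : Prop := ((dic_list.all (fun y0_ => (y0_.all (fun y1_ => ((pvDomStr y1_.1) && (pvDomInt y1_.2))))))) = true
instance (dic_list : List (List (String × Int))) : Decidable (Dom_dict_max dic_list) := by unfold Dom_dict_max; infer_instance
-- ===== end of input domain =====

-- B replaces A's two-pass group-then-reduce (per-word count lists, then a max over each list)
-- by a single pass keeping one running maximum per word; objective: simpler.


-- ===== PORT A =====
-- max(count_list); every count_list A builds is nonempty, so the default 0 is never read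
def pymaxA (l : List Int) : Int := (PySem.List.max? l id).getD 0

def dict_max (dic_list : List (List (String × Int))) : List (String × Int) :=
  -- first loop: 'if word not in result: result[word] = []; result[word].append(count)'
  -- is exactly Dict.modify with default [] (insert f(get(k, [])), new keys appended at the end)
  let result : PySem.Dict String (List Int) :=
    dic_list.foldl (fun r dic =>
      dic.foldl (fun r p => r.modify p.1 [] (· ++ [p.2])) r) PySem.Dict.empty
  -- second loop: 'for word, count_list in dict(result).items(): result[word] = max(count_list)';
  -- each key occurs once in items and the assignment changes the value type, so the port
  -- rebuilds the dict in the same iteration order (insert keeps insertion order)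
  (result.items.foldl (fun (acc : PySem.Dict String Int) p =>
      acc.insert p.1 (pymaxA p.2)) PySem.Dict.empty).items

-- ===== PORT B =====
def dict_max_alt (dic_list : List (List (String × Int))) : List (String × Int) :=
  (dic_list.foldl (fun (r : PySem.Dict String Int) dic =>
      dic.foldl (fun r p =>
        if r.contains p.1 then r.insert p.1 (max (r.getD p.1 0) p.2)
        else r.insert p.1 p.2) r) PySem.Dict.empty).items

-- ===== PRECONDITION & SPEC =====
def Spec_dict_max (dic_list : List (List (String × Int))) (out : List (String × Int)) : Prop := out = dict_max_alt dic_list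
instance (dic_list : List (List (String × Int))) (out : List (String × Int)) : Decidable (Spec_dict_max dic_list out) := by unfold Spec_dict_max; infer_instance

-- ===== CLAIM (what is proved, stated in full; the proofs are below) =====
def Claim_equal_dict_max : Prop := ∀ (dic_list : List (List (String × Int))), Dom_dict_max dic_list → Spec_dict_max dic_list (dict_max dic_list)

-- ===== LEMMAS AND PROOFS =====

-- the abstraction: take the max of every stored count list
def pvF (d : PySem.Dict String (List Int)) : PySem.Dict String Int :=
  PySem.Dict.mk (d.items.map (fun p => (p.1, pymaxA p.2)))

def pvStepA (r : PySem.Dict String (List Int)) (p : String × Int) : PySem.Dict String (List Int) :=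
  r.modify p.1 [] (· ++ [p.2])

def pvStepB (r : PySem.Dict String Int) (p : String × Int) : PySem.Dict String Int :=
  if r.contains p.1 then r.insert p.1 (max (r.getD p.1 0) p.2)
  else r.insert p.1 p.2

lemma pv_max?_cons : ∀ (xs : List Int) (x : Int),
    PySem.List.max? (x :: xs) id = some (xs.foldl max x) := by
  intro xs
  induction xs with
  | nil => intro x; rfl
  | cons y ys ih =>
    intro x
    have h1 := ih (max x y)
    have hstep : PySem.List.max? (x :: y :: ys) id = PySem.List.max? (max x y :: ys) id := by
      simp only [PySem.List.max?, List.foldl_cons]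
      by_cases h : x < y
      · simp [h, max_eq_right h.le]
      · simp [h, max_eq_left (not_lt.1 h)]
    rw [hstep, h1, List.foldl_cons]

lemma pymaxA_append (l : List Int) (c : Int) (h : l ≠ []) :
    pymaxA (l ++ [c]) = max (pymaxA l) c := by
  obtain ⟨x, xs, rfl⟩ := List.exists_cons_of_ne_nil h
  simp [pymaxA, List.cons_append, pv_max?_cons xs x, pv_max?_cons (xs ++ [c]) x, List.foldl_append]

lemma pv_get?_F (d : PySem.Dict String (List Int)) (w : String) :
    (pvF d).get? w = (d.get? w).map pymaxA := by
  show Option.map (fun x => x.2)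
      (List.find? (fun p => p.1 == w) ((d.items).map (fun p => (p.1, pymaxA p.2)))) = _
  rw [List.find?_map]
  have hcomp : ((fun (p : String × Int) => p.1 == w) ∘
      (fun (p : String × List Int) => (p.1, pymaxA p.2))) = (fun p => p.1 == w) := rfl
  rw [hcomp]
  show _ = Option.map pymaxA (Option.map (fun x => x.2) (List.find? (fun p => p.1 == w) d.items))
  rcases h : List.find? (fun p => p.1 == w) d.items with _ | p <;> rw [h] <;> rfl

lemma pv_contains_F (d : PySem.Dict String (List Int)) (w : String) :
    (pvF d).contains w = d.contains w := by
  rw [PySem.Dict.contains_eq_isSome_get?, PySem.Dict.contains_eq_isSome_get?, pv_get?_F]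
  rcases d.get? w <;> simp

-- one element step: the abstraction commutes with the two loop bodies
lemma pv_step (d : PySem.Dict String (List Int)) (p : String × Int)
    (hinv : ∀ q ∈ d.items, q.2 ≠ []) :
    pvF (pvStepA d p) = pvStepB (pvF d) p ∧ (∀ q ∈ (pvStepA d p).items, q.2 ≠ []) := by
  rcases hg : d.get? p.1 with _ | l
  · -- new key: both sides append
    have hc : d.contains p.1 = false := by
      rw [PySem.Dict.contains_eq_isSome_get?, hg]; rfl
    have hgd : d.getD p.1 [] = [] := PySem.Dict.getD_of_not_contains d [] hc
    have hitems : (pvStepA d p).items = d.items ++ [(p.1, [p.2])] := by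
      rw [pvStepA, PySem.Dict.modify, hgd]
      exact PySem.Dict.items_insert_of_not_contains d _ hc
    refine ⟨?_, ?_⟩
    · have hcF : (pvF d).contains p.1 = false := by rw [pv_contains_F]; exact hc
      have hB : pvStepB (pvF d) p = (pvF d).insert p.1 p.2 := by
        rw [pvStepB, hcF]; simp
      apply PySem.Dict.ext
      rw [hB, PySem.Dict.items_insert_of_not_contains _ _ hcF]
      show (pvStepA d p).items.map (fun p => (p.1, pymaxA p.2)) = _
      rw [hitems, List.map_append]
      rfl
    · intro q hq
      rw [hitems] at hq
      rcases List.mem_append.1 hq with h | h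
      · exact hinv q h
      · simp at h; subst h; simp
  · -- existing key: both sides overwrite in place
    have hc : d.contains p.1 = true := by
      rw [PySem.Dict.contains_eq_isSome_get?, hg]; rfl
    have hl : l ≠ [] := hinv _ (PySem.Dict.mem_items_of_get?_eq_some d hg)
    have hgd : d.getD p.1 [] = l := PySem.Dict.getD_of_get?_eq_some d [] hg
    have hitems : (pvStepA d p).items
        = d.items.map (fun q => if q.1 == p.1 then (p.1, l ++ [p.2]) else q) := by
      rw [pvStepA, PySem.Dict.modify, hgd]
      exact PySem.Dict.items_insert_of_contains d _ hc
    refine ⟨?_, ?_⟩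
    · have hcF : (pvF d).contains p.1 = true := by rw [pv_contains_F]; exact hc
      have hgF : (pvF d).getD p.1 0 = pymaxA l := by
        rw [PySem.Dict.getD_eq_get?_getD, pv_get?_F, hg]; rfl
      have hB : pvStepB (pvF d) p = (pvF d).insert p.1 (max (pymaxA l) p.2) := by
        rw [pvStepB, hcF, hgF]; simp
      apply PySem.Dict.ext
      rw [hB, PySem.Dict.items_insert_of_contains _ _ hcF]
      show (pvStepA d p).items.map (fun p => (p.1, pymaxA p.2)) = _
      rw [hitems]
      show _ = ((d.items.map (fun p => (p.1, pymaxA p.2))).map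
        (fun q => if q.1 == p.1 then (p.1, max (pymaxA l) p.2) else q))
      rw [List.map_map, List.map_map]
      apply List.map_congr_left
      intro q _
      by_cases hk : q.1 == p.1 <;>
        simp [Function.comp, hk, pymaxA_append l p.2 hl]
    · intro q hq
      rw [hitems] at hq
      obtain ⟨q', hq', hmap⟩ := List.mem_map.1 hq
      by_cases hk : q'.1 == p.1
      · rw [if_pos hk] at hmap; subst hmap; simp [hl]
      · rw [if_neg hk] at hmap; subst hmap; exact hinv _ hq'

-- the abstraction commutes with a whole pass over a flat list of (word, count) pairs
lemma pv_loop (L : List (String × Int)) :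
    ∀ (d : PySem.Dict String (List Int)), (∀ q ∈ d.items, q.2 ≠ []) →
      pvF (L.foldl pvStepA d) = L.foldl pvStepB (pvF d)
      ∧ (∀ q ∈ (L.foldl pvStepA d).items, q.2 ≠ []) := by
  induction L with
  | nil => intro d h; exact ⟨rfl, h⟩
  | cons p L ih =>
    intro d h
    obtain ⟨hs, hinv⟩ := pv_step d p h
    obtain ⟨h1, h2⟩ := ih (pvStepA d p) hinv
    exact ⟨by simp only [List.foldl_cons, h1, hs], h2⟩

-- the nested loops of both ports are the flat loop over the concatenation
lemma pv_nestA (dl : List (List (String × Int))) (d : PySem.Dict String (List Int)) :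
    dl.foldl (fun r dic => dic.foldl (fun r p => r.modify p.1 [] (· ++ [p.2])) r) d
      = dl.flatten.foldl pvStepA d := by
  rw [List.foldl_flatten]; rfl

lemma pv_nestB (dl : List (List (String × Int))) (d : PySem.Dict String Int) :
    dl.foldl (fun r dic => dic.foldl (fun r p =>
        if r.contains p.1 then r.insert p.1 (max (r.getD p.1 0) p.2)
        else r.insert p.1 p.2) r) d
      = dl.flatten.foldl pvStepB d := by
  rw [List.foldl_flatten]; rfl

lemma pv_nodup_keys (dl : List (List (String × Int))) :
    (dl.flatten.foldl pvStepA PySem.Dict.empty).keys.Nodup := by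
  have := PySem.Dict.nodup_keys_foldl_modify_key (dl.flatten) (fun p => p.1)
    ([] : List Int) (fun _ p => (· ++ [p.2])) PySem.Dict.empty
    (by simp [PySem.Dict.keys_empty])
  simpa [pvStepA] using this

-- ===== VERDICT (by name: the statement is the Claim_ definition above) =====
theorem dict_max_spec : Claim_equal_dict_max := by
  intro dl _
  unfold Spec_dict_max dict_max dict_max_alt
  rw [pv_nestA, pv_nestB]
  show (List.foldl (fun acc p => acc.insert p.1 (pymaxA p.2)) PySem.Dict.empty
      (dl.flatten.foldl pvStepA PySem.Dict.empty).items).items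
    = (dl.flatten.foldl pvStepB PySem.Dict.empty).items
  obtain ⟨hF, _⟩ := pv_loop dl.flatten PySem.Dict.empty (by intro q hq; simp [PySem.Dict.empty] at hq)
  have hnd : ((dl.flatten.foldl pvStepA PySem.Dict.empty).items.map (fun p => p.1)).Nodup := by
    have := pv_nodup_keys dl
    simpa [PySem.Dict.keys] using this
  have hfresh : ∀ p ∈ (dl.flatten.foldl pvStepA PySem.Dict.empty).items,
      (PySem.Dict.empty : PySem.Dict String Int).contains p.1 = false := by
    intro p _; simp [PySem.Dict.contains_empty]
  have hitems := PySem.Dict.items_foldl_insert_fresh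
    ((dl.flatten.foldl pvStepA PySem.Dict.empty).items) (fun p => p.1) (fun p => pymaxA p.2)
    PySem.Dict.empty hfresh hnd
  rw [hitems]
  have hE : (pvF PySem.Dict.empty : PySem.Dict String Int) = PySem.Dict.empty := rfl
  rw [hE] at hF
  rw [← hF]
  rfl
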